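-- pv_equiv track=rewrite | github.com/kamilkolo22/ChinesePostman | ToolBox.py | find_odd_degree
-- ===== SOURCE A (Python) =====
-- def find_odd_degree(graph):
--     degrees = odd_vertexes_degree(graph)
--     graph_l = list(graph)
--     vertexes = []
--     for i in range(len(graph)):
--         if degrees[i]:
--             vertexes.append(graph_l[i])
--     return vertexes
--
-- def odd_vertexes_degree(graph):
--     """Sprawdze ile jest wierzcholkow nieparzystych"""
--     odd_degree = []
--     for v in graph:
--         if len(graph[v]) % 2:
--             odd_degree.append(1)
--         else:
--             odd_degree.append(0)
--     return odd_degree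
-- ===== SOURCE B (Python) =====
-- def find_odd_degree(graph):
--     items = list(graph.items())
--     out = []
--     while items:
--         v, edges = items.pop()
--         if len(edges) & 1:
--             out.append(v)
--     out.reverse()
--     return out
-- ===== Notes on version B (the rewrite author's own statement) =====
-- stated objective: alternative
-- what changed: Replaces A's two staged forward passes (a 0/1 parity table built via dict lookups, then an index-based re-selection from list(graph)) with a single backward consumption of the item list as a stack (pop from the end, bit-test the entry's own adjacency-list parity, append) followed by one final reverse to restore insertion order.
import Mathlib
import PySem

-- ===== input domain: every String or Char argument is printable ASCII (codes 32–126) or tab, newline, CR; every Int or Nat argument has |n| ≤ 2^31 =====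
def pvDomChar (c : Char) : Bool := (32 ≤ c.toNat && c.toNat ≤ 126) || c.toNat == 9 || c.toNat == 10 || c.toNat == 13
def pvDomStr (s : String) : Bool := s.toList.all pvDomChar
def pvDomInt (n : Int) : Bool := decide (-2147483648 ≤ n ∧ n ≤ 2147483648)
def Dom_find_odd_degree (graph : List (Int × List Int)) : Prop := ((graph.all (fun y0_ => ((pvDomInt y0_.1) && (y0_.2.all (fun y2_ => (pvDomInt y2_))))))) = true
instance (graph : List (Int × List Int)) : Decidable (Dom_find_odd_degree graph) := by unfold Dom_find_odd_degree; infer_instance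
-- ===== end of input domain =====

-- B replaces A's two forward passes (parity table via dict lookups, then index-based
-- re-selection from list(graph)) with a backward pop-loop over a stack of items plus a
-- final reverse; same cost, a different decomposition. B mutates only its local copy.


-- ===== PORT A =====
-- helper: odd_vertexes_degree — for v in graph: append 1 if len(graph[v]) % 2 else 0
def odd_vertexes_degree (graph : List (Int × List Int)) : List Int :=
  graph.foldl
    (fun odd_degree kv =>
      if ((PySem.Dict.mk graph).getD kv.1 []).length % 2 ≠ 0 then
        odd_degree ++ [1]
      else
        odd_degree ++ [0])
    []

def find_odd_degree (graph : List (Int × List Int)) : List Int :=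
  let degrees := odd_vertexes_degree graph
  let graph_l := graph.map Prod.fst
  (PySem.List.pyRange 0 (graph.length : Int) 1).foldl
    (fun vertexes i =>
      if PySem.List.pyGetD degrees i 0 ≠ 0 then
        vertexes ++ [PySem.List.pyGetD graph_l i 0]
      else
        vertexes)
    []

-- ===== PORT B =====
-- the while loop: 'while items: v, edges = items.pop(); if len(edges) & 1: out.append(v)'
-- (items.pop() on the nonempty list = its last element, ported as getLastD, exact here)
def pop_loop : List (Int × List Int) → List Int → List Int
  | [], out => out
  | a :: rest, out =>
    let kv := (a :: rest).getLastD (0, [])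
    let items' := (a :: rest).dropLast
    pop_loop items' (if kv.2.length &&& 1 ≠ 0 then out ++ [kv.1] else out)
termination_by items _ => items.length
decreasing_by simp

def find_odd_degree_alt (graph : List (Int × List Int)) : List Int :=
  (pop_loop graph []).reverse

-- ===== PRECONDITION & SPEC =====
-- graph is a Python dict, so its keys are distinct by construction; Pre_ states just that.
def Pre_find_odd_degree (graph : List (Int × List Int)) : Prop := (graph.map Prod.fst).Nodup
instance (graph : List (Int × List Int)) : Decidable (Pre_find_odd_degree graph) := by unfold Pre_find_odd_degree; infer_instance
def pvWitness_find_odd_degree : (List (Int × List Int)) := [(1, [2, 3, 4]), (2, [1]), (3, [1]), (4, [1]), (5, [])]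

def Spec_find_odd_degree (graph : List (Int × List Int)) (out : List Int) : Prop := out = find_odd_degree_alt graph
instance (graph : List (Int × List Int)) (out : List Int) : Decidable (Spec_find_odd_degree graph out) := by unfold Spec_find_odd_degree; infer_instance

-- ===== CLAIM (what is proved, stated in full; the proofs are below) =====
def Claim_equal_find_odd_degree : Prop := ∀ (graph : List (Int × List Int)), Dom_find_odd_degree graph → Pre_find_odd_degree graph → Spec_find_odd_degree graph (find_odd_degree graph)

-- ===== LEMMAS AND PROOFS =====

-- The backward pop-loop accumulates, in reverse, exactly the odd-degree vertices.
theorem pop_loop_concat (ys : List (Int × List Int)) (y : Int × List Int) (out : List Int) :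
    pop_loop (ys ++ [y]) out
      = pop_loop ys (if y.2.length &&& 1 ≠ 0 then out ++ [y.1] else out) := by
  cases ys with
  | nil => simp [pop_loop]
  | cons a rest =>
    rw [pop_loop.eq_def]
    split
    next h => exact absurd h (by simp)
    next a' rest' h =>
      dsimp only
      rw [← h, List.getLastD_concat, List.dropLast_concat]

theorem pop_loop_eq (items : List (Int × List Int)) :
    ∀ out, pop_loop items out
      = out ++ ((items.filter (fun kv => kv.2.length % 2 ≠ 0)).map Prod.fst).reverse := by
  induction items using List.reverseRecOn with
  | nil => intro out; simp [pop_loop]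
  | append_singleton ys y ih =>
    intro out
    rw [pop_loop_concat, ih]
    by_cases hp : y.2.length % 2 ≠ 0
    · have h1 : y.2.length % 2 = 1 := by omega
      simp [List.filter_append, List.filter, h1, Nat.and_one_is_mod]
    · have h0 : y.2.length % 2 = 0 := by omega
      simp [List.filter_append, List.filter, h0, Nat.and_one_is_mod]

theorem alt_eq_filter_map (graph : List (Int × List Int)) :
    find_odd_degree_alt graph
      = (graph.filter (fun kv => kv.2.length % 2 ≠ 0)).map Prod.fst := by
  unfold find_odd_degree_alt
  rw [pop_loop_eq]
  simp

-- With distinct keys, the dict lookup in odd_vertexes_degree returns each entry's own list,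
-- so the parity table is a map over the entries.
theorem odd_vertexes_degree_eq_map (graph : List (Int × List Int))
    (h : (graph.map Prod.fst).Nodup) :
    odd_vertexes_degree graph
      = graph.map (fun kv => if kv.2.length % 2 ≠ 0 then (1 : Int) else 0) := by
  unfold odd_vertexes_degree
  rw [PySem.List.foldl_congr_mem _ _
        (fun odd_degree kv => odd_degree ++ [if kv.2.length % 2 ≠ 0 then (1 : Int) else 0]) []
        ?_]
  · exact PySem.List.foldl_append_singleton_eq_map _ _ _
  · intro acc kv hmem
    have hitems : (kv.1, kv.2) ∈ (PySem.Dict.mk graph).items := by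
      simpa using hmem
    have hkeys : (PySem.Dict.mk graph).keys.Nodup := by
      simpa [PySem.Dict.keys] using h
    rw [PySem.Dict.getD_of_mem_items _ hitems hkeys]
    split <;> simp_all

theorem find_odd_degree_eq_alt (graph : List (Int × List Int))
    (h : (graph.map Prod.fst).Nodup) :
    find_odd_degree graph = find_odd_degree_alt graph := by
  unfold find_odd_degree
  rw [alt_eq_filter_map graph]
  rw [odd_vertexes_degree_eq_map graph h]
  rw [PySem.List.foldl_congr_mem _ _
        (fun vertexes i =>
          if (fun kv : Int × List Int => if kv.2.length % 2 ≠ 0 then (1 : Int) else 0)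
               (PySem.List.pyGetD graph i (0, [])) ≠ 0 then
            vertexes ++ [(PySem.List.pyGetD graph i (0, [])).1]
          else vertexes) []
        ?_]
  · rw [PySem.List.foldl_pyRange_zero_pyGetD' graph (0, [])
          (fun vertexes kv =>
            if (if kv.2.length % 2 ≠ 0 then (1 : Int) else 0) ≠ 0 then
              vertexes ++ [kv.1]
            else vertexes) []]
    have := PySem.List.foldl_append_if
      (fun kv : Int × List Int => decide (kv.2.length % 2 ≠ 0)) (fun kv => kv.1) graph ([] : List Int)
    simp only [decide_eq_true_eq] at this
    rw [PySem.List.foldl_congr_mem _ _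
          (fun acc (x : Int × List Int) => if x.2.length % 2 ≠ 0 then acc ++ [x.1] else acc) []
          (by intro acc kv _; by_cases hp : kv.2.length % 2 ≠ 0 <;> simp [hp])]
    simpa using this
  · intro acc i hmem
    obtain ⟨h0, h1⟩ := PySem.List.mem_pyRange_one.mp hmem
    have h1' : i < (graph.length : Int) := h1
    beta_reduce
    rw [PySem.List.pyGetD_eq_getElem _ _ h0 (by simpa using h1'),
        PySem.List.pyGetD_eq_getElem _ _ h0 (by simpa using h1'),
        PySem.List.pyGetD_eq_getElem graph (0, []) h0 h1']
    simp

-- ===== VERDICT (by name: the statement is the Claim_ definition above) =====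
theorem find_odd_degree_spec : Claim_equal_find_odd_degree := by
  intro graph _ hpre
  exact find_odd_degree_eq_alt graph hpre
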